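-- pv_equiv track=rewrite | github.com/eva-burns/eva-bgu-projects-2021 | toyproblems/before/Palindrome.py | solution
-- ===== SOURCE A (Python) =====
-- def solution(N, K):
--     # write your code in Python 3.6
--     alphabet = ["a", "b", "c", "d", "e", "f", "g", "h", "i",
--         "j", "k", "l", "m", "n", "o", "p", "q", "r", "s", "t",
--         "u", "v", "w", "x", "y", "z"]
--     first_half = ""
--     for i in range(int(N/2) + N%2):
--         if(i < K):
--             first_half += alphabet[i]
--         else:
--             first_half += alphabet[K-1]
--     palin = ""
--     if N%2 != 0:
--         palin = first_half[0:-1]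
--         palin += first_half[::-1]
--     else:
--         palin = first_half
--         palin += first_half[::-1]
--     return palin
-- ===== SOURCE B (Python) =====
-- def solution(N, K):
--     # Each output position j is the distance to the nearest end, capped at K-1.
--     alphabet = "abcdefghijklmnopqrstuvwxyz"
--     return "".join(alphabet[min(j, N - 1 - j, K - 1)] for j in range(N))
-- ===== Notes on version B (the rewrite author's own statement) =====
-- stated objective: simpler
-- what changed: Replaces the build-half-then-mirror construction (prefix string grown in a loop, [0:-1] trim, [::-1] reversal and concatenation) by a direct per-position formula: position j gets alphabet[min(j, N-1-j, K-1)], joined over range(N).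
-- intended difference: For N = -1 (the only negative N where range(int(N/2)+N%2) is nonempty, an artefact of int(-0.5)=0 and -1%2=1) A returns a one-character string such as 'a', while B returns '' as for every other nonpositive N, the intended empty output. — e.g. on solution(-1, 3): A returns "a", B returns ""
import Mathlib
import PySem

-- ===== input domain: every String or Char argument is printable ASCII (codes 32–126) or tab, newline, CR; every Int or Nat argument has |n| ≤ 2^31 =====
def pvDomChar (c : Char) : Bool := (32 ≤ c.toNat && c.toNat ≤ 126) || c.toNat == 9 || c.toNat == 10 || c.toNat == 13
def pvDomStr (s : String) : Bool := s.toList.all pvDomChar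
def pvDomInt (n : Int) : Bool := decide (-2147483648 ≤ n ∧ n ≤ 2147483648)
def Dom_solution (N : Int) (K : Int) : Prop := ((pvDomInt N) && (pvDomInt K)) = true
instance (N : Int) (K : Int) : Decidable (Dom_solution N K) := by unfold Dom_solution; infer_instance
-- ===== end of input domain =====

-- B replaces A's build-half-then-mirror construction by a direct per-position formula
-- alphabet[min(j, N-1-j, K-1)] over range(N); same cost, a different decomposition.


-- ===== PORT A =====
-- A's alphabet: a list of one-character strings, kept as a list of chars (strings are ported on the List Char side).
def pvAlphaA : List Char :=
  ['a','b','c','d','e','f','g','h','i','j','k','l','m','n','o','p','q','r','s','t','u','v','w','x','y','z']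

-- int(N/2) is Python's float division truncated toward zero = truncdiv (exact: |N| ≤ 2^31 < 2^53).
def solution (N : Int) (K : Int) : String :=
  let first_half : List Char :=
    (PySem.List.pyRange 0 (PySem.Int.truncdiv N 2 + PySem.Int.mod N 2) 1).foldl
      (fun acc i =>
        if i < K then acc ++ [PySem.List.pyGetD pvAlphaA i '?']
        else acc ++ [PySem.List.pyGetD pvAlphaA (K - 1) '?']) []
  let palin : List Char :=
    if PySem.Int.mod N 2 ≠ 0 then
      PySem.List.slice first_half none (some (-1)) ++
        ((PySem.List.slice? first_half none none (-1)).getD [])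
    else
      first_half ++ ((PySem.List.slice? first_half none none (-1)).getD [])
  String.ofList palin

-- ===== PORT B =====
def pvAlphaB : List Char := "abcdefghijklmnopqrstuvwxyz".toList

def solution_alt (N : Int) (K : Int) : String :=
  String.ofList ((PySem.List.pyRange 0 N 1).map
    (fun j => PySem.List.pyGetD pvAlphaB (min (min j (N - 1 - j)) (K - 1)) '?'))

-- ===== PRECONDITION & SPEC =====
-- Pre_ excludes exactly the inputs on which A raises IndexError: the loop runs (N ≥ 1 or N = -1)
-- and either K ≤ -26 (alphabet[K-1] below -26) or K ≥ 27 with N ≥ 53 (alphabet[26] reached).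
def Pre_solution (N : Int) (K : Int) : Prop :=
  (1 ≤ N ∨ N = -1) → (-25 ≤ K ∧ (K ≤ 26 ∨ N ≤ 52))
instance (N : Int) (K : Int) : Decidable (Pre_solution N K) := by unfold Pre_solution; infer_instance
def pvWitness_solution : Int × Int := (7, 3)

-- For N = -1 (the only negative N where range(int(N/2)+N%2) is nonempty, an artefact of int(-0.5)=0
-- and -1%2=1) A returns a one-character string, while B returns '' as for every other nonpositive N,
-- the intended empty output.
def D_solution (N : Int) (K : Int) : Prop := N = -1
instance (N : Int) (K : Int) : Decidable (D_solution N K) := by unfold D_solution; infer_instance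
def Spec_solution (N : Int) (K : Int) (out : String) : Prop := ¬ D_solution N K → out = solution_alt N K
instance (N : Int) (K : Int) (out : String) : Decidable (Spec_solution N K out) := by unfold Spec_solution; infer_instance
def pvDiffWitness_solution : Int × Int := (-1, 3)
def pvDiffWitnessOut_solution : String × String := ("a", "")

-- ===== CLAIM =====
def Claim_unchanged_solution : Prop := ∀ (N : Int) (K : Int), Dom_solution N K → Pre_solution N K → Spec_solution N K (solution N K)
def Claim_changed_solution : Prop := Dom_solution (pvDiffWitness_solution.1) (pvDiffWitness_solution.2) ∧ Pre_solution (pvDiffWitness_solution.1) (pvDiffWitness_solution.2) ∧ D_solution (pvDiffWitness_solution.1) (pvDiffWitness_solution.2) ∧ solution (pvDiffWitness_solution.1) (pvDiffWitness_solution.2) = pvDiffWitnessOut_solution.1 ∧ solution_alt (pvDiffWitness_solution.1) (pvDiffWitness_solution.2) = pvDiffWitnessOut_solution.2 ∧ pvDiffWitnessOut_solution.1 ≠ pvDiffWitnessOut_solution.2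
def Claim_exact_solution : Prop := ∀ (N : Int) (K : Int), Dom_solution N K → Pre_solution N K → D_solution N K → solution N K ≠ solution_alt N K

-- ===== LEMMAS AND PROOFS =====

-- A's per-index character (the loop body's value at index i).
def pvGA (K i : Int) : Char :=
  if i < K then PySem.List.pyGetD pvAlphaA i '?' else PySem.List.pyGetD pvAlphaA (K - 1) '?'

theorem pvAlphaB_eq : pvAlphaB = pvAlphaA := by decide

-- A's branch on i agrees with B's capped-minimum index, unconditionally.
theorem pvGA_eq_min (K d : Int) :
    pvGA K d = PySem.List.pyGetD pvAlphaB (min d (K - 1)) '?' := by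
  unfold pvGA
  rw [pvAlphaB_eq]
  split
  · have : min d (K - 1) = d := by omega
    rw [this]
  · have : min d (K - 1) = K - 1 := by omega
    rw [this]

theorem pv_first_half (K h : Int) :
    (PySem.List.pyRange 0 h 1).foldl
      (fun acc i =>
        if i < K then acc ++ [PySem.List.pyGetD pvAlphaA i '?']
        else acc ++ [PySem.List.pyGetD pvAlphaA (K - 1) '?']) [] =
    (PySem.List.pyRange 0 h 1).map (pvGA K) := by
  have hfun : (fun (acc : List Char) (i : Int) =>
      if i < K then acc ++ [PySem.List.pyGetD pvAlphaA i '?']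
      else acc ++ [PySem.List.pyGetD pvAlphaA (K - 1) '?']) =
      (fun acc i => acc ++ [pvGA K i]) := by
    funext acc i
    unfold pvGA
    split <;> rfl
  rw [hfun, PySem.List.foldl_append_singleton_eq_map, List.nil_append]

theorem pv_solution_eq (N K : Int) :
    solution N K = String.ofList (
      let fh := (PySem.List.pyRange 0 (PySem.Int.truncdiv N 2 + PySem.Int.mod N 2) 1).map (pvGA K)
      if PySem.Int.mod N 2 ≠ 0 then fh.dropLast ++ fh.reverse else fh ++ fh.reverse) := by
  unfold solution
  rw [pv_first_half]
  simp only [PySem.List.slice?_none_none_neg_one, Option.getD_some, PySem.List.slice_to_neg_one]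

theorem pv_alt_eq (N K : Int) :
    solution_alt N K = String.ofList ((PySem.List.pyRange 0 N 1).map
      (fun j => pvGA K (min j (N - 1 - j)))) := by
  unfold solution_alt
  congr 1
  apply List.map_congr_left
  intro j _
  rw [pvGA_eq_min, min_assoc]

theorem pv_tdiv_two (N : Int) (h : 0 ≤ N) : PySem.Int.truncdiv N 2 = N / 2 := by
  unfold PySem.Int.truncdiv
  exact Int.tdiv_eq_ediv_of_nonneg h

theorem pv_mod_two (N : Int) : PySem.Int.mod N 2 = N % 2 :=
  PySem.Int.mod_eq_emod_of_pos (by omega)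

-- the main elementwise identity for N ≥ 1
theorem pv_main (N K : Int) (hN : 1 ≤ N) :
    (let fh := (PySem.List.pyRange 0 (PySem.Int.truncdiv N 2 + PySem.Int.mod N 2) 1).map (pvGA K)
      if PySem.Int.mod N 2 ≠ 0 then fh.dropLast ++ fh.reverse else fh ++ fh.reverse) =
    (PySem.List.pyRange 0 N 1).map (fun j => pvGA K (min j (N - 1 - j))) := by
  have hm := pv_mod_two N
  have ht := pv_tdiv_two N (by omega)
  have hmod : N % 2 = 0 ∨ N % 2 = 1 := Int.emod_two_eq_zero_or_one N
  set h : Int := PySem.Int.truncdiv N 2 + PySem.Int.mod N 2 with hh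
  have h2 : 2 * h = N + N % 2 := by omega
  have hpos : 1 ≤ h := by omega
  have hlenr : ((PySem.List.pyRange 0 h 1).map (pvGA K)).length = h.toNat := by
    simp [PySem.List.length_pyRange_one]
  have hget : ∀ (k : Nat) (hk : k < h.toNat),
      ((PySem.List.pyRange 0 h 1).map (pvGA K))[k]'(by rw [hlenr]; exact hk) = pvGA K k := by
    intro k hk
    rw [List.getElem_map, PySem.List.getElem_pyRange_one]
    simp
  have hgoalget : ∀ (k : Nat) (hk : k < ((PySem.List.pyRange 0 N 1).map
      (fun j => pvGA K (min j (N - 1 - j)))).length),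
      ((PySem.List.pyRange 0 N 1).map (fun j => pvGA K (min j (N - 1 - j))))[k] =
        pvGA K (min (k : Int) (N - 1 - k)) := by
    intro k hk
    rw [List.getElem_map, PySem.List.getElem_pyRange_one]
    simp
  simp only []
  rcases hmod with he | ho
  · -- even N
    rw [if_neg (by omega)]
    apply List.ext_getElem
    · simp [PySem.List.length_pyRange_one]; omega
    · intro k hk1 hk2
      rw [hgoalget k hk2]
      rcases Nat.lt_or_ge k h.toNat with hlt | hge
      · rw [List.getElem_append_left (by rw [hlenr]; exact hlt), hget k hlt]
        have : min (k : Int) (N - 1 - k) = (k : Int) := by omega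
        rw [this]
      · have hklt : k < N.toNat := by
          have := hk2; simpa [PySem.List.length_pyRange_one] using this
        rw [List.getElem_append_right (by rw [hlenr]; exact hge)]
        rw [List.getElem_reverse, hget]
        · have hidx : ((PySem.List.pyRange 0 h 1).map (pvGA K)).length - 1 -
              (k - ((PySem.List.pyRange 0 h 1).map (pvGA K)).length) = (2 * h - 1 - k).toNat := by
            rw [hlenr]; omega
          rw [hidx]
          have : ((2 * h - 1 - (k : Int)).toNat : Int) = N - 1 - k := by omega
          rw [this]
          have : min (N - 1 - (k : Int)) ((k : Int)) = N - 1 - k := by omega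
          rw [min_comm] at this
          rw [this]
        · rw [hlenr]; omega
  · -- odd N
    rw [if_pos (by omega)]
    apply List.ext_getElem
    · simp [PySem.List.length_pyRange_one]; omega
    · intro k hk1 hk2
      rw [hgoalget k hk2]
      have hdl : (((PySem.List.pyRange 0 h 1).map (pvGA K)).dropLast).length = h.toNat - 1 := by
        rw [List.length_dropLast, hlenr]
      rcases Nat.lt_or_ge k (h.toNat - 1) with hlt | hge
      · rw [List.getElem_append_left (by rw [hdl]; exact hlt)]
        rw [List.getElem_dropLast, hget k (by omega)]
        have : min (k : Int) (N - 1 - k) = (k : Int) := by omega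
        rw [this]
      · have hklt : k < N.toNat := by
          have := hk2; simpa [PySem.List.length_pyRange_one] using this
        rw [List.getElem_append_right (by rw [hdl]; exact hge)]
        rw [List.getElem_reverse, hget]
        · have hidx : ((PySem.List.pyRange 0 h 1).map (pvGA K)).length - 1 -
              (k - (((PySem.List.pyRange 0 h 1).map (pvGA K)).dropLast).length) = (2 * h - 2 - k).toNat := by
            rw [hlenr, hdl]; omega
          rw [hidx]
          have : ((2 * h - 2 - (k : Int)).toNat : Int) = N - 1 - k := by omega
          rw [this]
          have : min ((k : Int)) (N - 1 - k) = N - 1 - k := by omega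
          rw [this]
        · rw [hlenr, hdl]; omega

theorem pv_neg_empty (N K : Int) (h1 : N ≤ 0) (h2 : N ≠ -1) : solution N K = String.ofList [] := by
  rw [pv_solution_eq]
  have hr : PySem.List.pyRange 0 (PySem.Int.truncdiv N 2 + PySem.Int.mod N 2) 1 = [] := by
    apply PySem.List.pyRange_one_eq_nil
    have hm := pv_mod_two N
    have hmod : N % 2 = 0 ∨ N % 2 = 1 := Int.emod_two_eq_zero_or_one N
    rcases (by omega : 0 ≤ N ∨ N < 0) with hge | hlt
    · have h0 : N = 0 := by omega
      subst h0; decide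
    · -- N ≤ -2 : truncdiv N 2 = -((-N)/2)
      have hneg : PySem.Int.truncdiv N 2 = -((-N) / 2) := by
        unfold PySem.Int.truncdiv
        rw [show N = -(-N) by ring, Int.neg_tdiv, Int.tdiv_eq_ediv_of_nonneg (by omega)]
        simp
      have hdiv : 1 ≤ (-N) / 2 := by
        have : (2 : Int) ∣ 2 := dvd_refl 2
        omega
      omega
  rw [hr]
  simp

-- ===== VERDICT =====
theorem solution_spec : Claim_unchanged_solution := by
  intro N K _ _ hD
  unfold D_solution at hD
  rcases (by omega : N ≤ 0 ∨ 0 < N) with hle | hpos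
  · rw [pv_neg_empty N K hle hD, pv_alt_eq]
    rw [PySem.List.pyRange_one_eq_nil (by omega)]
    rfl
  · rw [pv_alt_eq, pv_solution_eq, pv_main N K (by omega)]

theorem solution_changed : Claim_changed_solution := by unfold Claim_changed_solution; decide

theorem solution_tight : Claim_exact_solution := by
  intro N K _ hPre hD
  unfold D_solution at hD
  subst hD
  rw [pv_solution_eq, pv_alt_eq]
  rw [PySem.List.pyRange_one_eq_nil (by omega : (-1 : Int) ≤ 0)]
  have hr : PySem.List.pyRange 0 (PySem.Int.truncdiv (-1) 2 + PySem.Int.mod (-1) 2) 1 = [0] := by decide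
  rw [hr]
  simp only [List.map_cons, List.map_nil]
  intro hcontra
  have := congrArg String.toList hcontra
  simp at this
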